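-- pv_equiv track=rewrite | github.com/bendodag/JBA_python_course | tic_tac_toe.py | fn_chars
-- ===== SOURCE A (Python) =====
-- def fn_chars(sub_str):
--     n_chars = []
--
--     for part in sub_str:
--         n_X = 0
--         n_O = 0
--         n_e = 0
--
--         for i in part:
--             if i == "X":
--                 n_X += 1
--             elif i == "O":
--                 n_O += 1
--             else:
--                 n_e += 1
--
--         n_chars.append([n_X,n_O,n_e])
--
--     return n_chars
-- ===== SOURCE B (Python) =====
-- def fn_chars(sub_str):
--     return [[part.count("X"),
--              part.count("O"),
--              len(part) - part.count("X") - part.count("O")]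
--             for part in sub_str]
-- ===== Notes on version B (the rewrite author's own statement) =====
-- stated objective: simpler
-- what changed: Replaces the explicit per-character classifying loop with a comprehension using str.count for 'X' and 'O' and a closed-form subtraction for the remainder.
import Mathlib
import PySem

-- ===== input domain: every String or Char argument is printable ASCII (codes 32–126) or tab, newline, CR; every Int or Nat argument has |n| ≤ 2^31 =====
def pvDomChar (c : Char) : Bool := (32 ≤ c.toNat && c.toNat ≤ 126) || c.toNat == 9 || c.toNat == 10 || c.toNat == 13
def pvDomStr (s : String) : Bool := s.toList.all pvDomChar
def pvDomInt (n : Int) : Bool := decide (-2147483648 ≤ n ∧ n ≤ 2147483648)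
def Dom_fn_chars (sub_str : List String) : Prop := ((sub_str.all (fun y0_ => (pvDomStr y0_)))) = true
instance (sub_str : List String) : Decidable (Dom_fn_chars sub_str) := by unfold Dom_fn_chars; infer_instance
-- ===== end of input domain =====

-- B replaces A's per-character classifying loop with str.count calls and a length subtraction (objective: simpler).

-- ===== PORT A =====
-- inner 'for i in part' loop carrying the three counters (n_X, n_O, n_e)
def fn_chars_inner (part : List Char) : Int × Int × Int :=
  part.foldl
    (fun (t : Int × Int × Int) i =>
      if i == 'X' then (t.1 + 1, t.2.1, t.2.2)
      else if i == 'O' then (t.1, t.2.1 + 1, t.2.2)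
      else (t.1, t.2.1, t.2.2 + 1))
    (0, 0, 0)

def fn_chars (sub_str : List String) : List (List Int) :=
  sub_str.foldl
    (fun n_chars part =>
      let t := fn_chars_inner part.toList
      n_chars ++ [[t.1, t.2.1, t.2.2]])
    []

-- ===== PORT B =====
def fn_chars_alt (sub_str : List String) : List (List Int) :=
  sub_str.map (fun part =>
    [(PySem.Str.count part "X" : Int),
     (PySem.Str.count part "O" : Int),
     (PySem.Str.len part : Int) - (PySem.Str.count part "X" : Int) - (PySem.Str.count part "O" : Int)])

-- ===== PRECONDITION & SPEC =====
def Spec_fn_chars (sub_str : List String) (out : List (List Int)) : Prop := out = fn_chars_alt sub_str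
instance (sub_str : List String) (out : List (List Int)) : Decidable (Spec_fn_chars sub_str out) := by unfold Spec_fn_chars; infer_instance

-- ===== CLAIM (what is proved, stated in full; the proofs are below) =====
def Claim_equal_fn_chars : Prop := ∀ (sub_str : List String), Dom_fn_chars sub_str → Spec_fn_chars sub_str (fn_chars sub_str)

-- ===== LEMMAS AND PROOFS =====

-- Chars.count.go for a single-character pattern counts occurrences of that character.
theorem count_go_singleton (x : Char) (l : List Char) (fuel acc : Nat)
    (h : l.length ≤ fuel) :
    PySem.Chars.count.go [x] fuel l acc = acc + l.count x := by
  induction l generalizing fuel acc with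
  | nil =>
    cases fuel <;> simp [PySem.Chars.count.go]
  | cons c t ih =>
    cases fuel with
    | zero => simp at h
    | succ n =>
      simp only [List.length_cons, Nat.succ_le_succ_iff] at h
      rw [PySem.Chars.count.go]
      by_cases hc : c = x
      · subst hc
        have hp : [c].isPrefixOf (c :: t) = true := by simp [List.isPrefixOf]
        rw [if_pos hp]
        simp only [List.length_cons, List.length_nil, List.drop_succ_cons, List.drop_zero]
        rw [ih n (acc + 1) h]
        simp [List.count_cons]
        omega
      · have hp : [x].isPrefixOf (c :: t) = false := by
          simp [List.isPrefixOf, hc]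
          intro hxc; exact hc hxc.symm
        rw [if_neg (by simp [hp])]
        rw [ih n acc h]
        simp [List.count_cons, hc]

theorem chars_count_singleton (x : Char) (l : List Char) :
    PySem.Chars.count l [x] = l.count x := by
  simp [PySem.Chars.count, count_go_singleton x l l.length 0 (le_refl _)]

-- A's inner loop computes (count 'X', count 'O', length - count 'X' - count 'O').
theorem inner_loop_eq (l : List Char) (a b c : Int) :
    l.foldl
      (fun (t : Int × Int × Int) i =>
        if i == 'X' then (t.1 + 1, t.2.1, t.2.2)
        else if i == 'O' then (t.1, t.2.1 + 1, t.2.2)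
        else (t.1, t.2.1, t.2.2 + 1))
      (a, b, c)
    = (a + l.count 'X', b + l.count 'O',
       c + ((l.length : Int) - l.count 'X' - l.count 'O')) := by
  induction l generalizing a b c with
  | nil => simp
  | cons i t ih =>
    rw [List.foldl_cons]
    by_cases hX : i = 'X'
    · rw [if_pos (by simp [hX]), ih]
      rw [Prod.mk.injEq, Prod.mk.injEq]
      refine ⟨?_, ?_, ?_⟩ <;> simp [List.count_cons, hX] <;> push_cast <;> ring
    · by_cases hO : i = 'O'
      · rw [if_neg (by simp [hX]), if_pos (by simp [hO]), ih]
        rw [Prod.mk.injEq, Prod.mk.injEq]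
        refine ⟨?_, ?_, ?_⟩ <;> simp [List.count_cons, hX, hO] <;> push_cast <;> ring
      · rw [if_neg (by simp [hX]), if_neg (by simp [hO]), ih]
        rw [Prod.mk.injEq, Prod.mk.injEq]
        refine ⟨?_, ?_, ?_⟩ <;> simp [List.count_cons, hX, hO] <;> push_cast <;> ring

theorem fn_chars_inner_eq (l : List Char) :
    fn_chars_inner l
      = ((l.count 'X' : Int), (l.count 'O' : Int),
         (l.length : Int) - l.count 'X' - l.count 'O') := by
  rw [fn_chars_inner, inner_loop_eq]
  simp

theorem fn_chars_foldl_eq (sub_str : List String) (acc : List (List Int)) :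
    sub_str.foldl
      (fun n_chars part =>
        let t := fn_chars_inner part.toList
        n_chars ++ [[t.1, t.2.1, t.2.2]])
      acc
    = acc ++ fn_chars_alt sub_str := by
  induction sub_str generalizing acc with
  | nil => simp [fn_chars_alt]
  | cons p t ih =>
    rw [List.foldl_cons, ih]
    simp [fn_chars_alt, fn_chars_inner_eq, PySem.Str.count, PySem.Str.len,
      chars_count_singleton]

-- ===== VERDICT (by name: the statement is the Claim_ definition above) =====
theorem fn_chars_spec : Claim_equal_fn_chars := by
  intro sub_str _
  unfold Spec_fn_chars fn_chars
  rw [fn_chars_foldl_eq]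
  simp
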